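-- pv_equiv track=rewrite | github.com/kakerutoB/calorie-app | app.py | recommended_cal
-- ===== SOURCE A (Python) =====
-- RECOMMENDED = {
--     "male": [(18, 29, 2650), (30, 49, 2700), (50, 150, 2500)],
--     "female": [(18, 29, 2000), (30, 49, 2050), (50, 150, 1950)]
-- }
--
-- AVERAGE = 2300
--
-- def recommended_cal(gender, age):
--     if not gender or not age:
--         return AVERAGE
--     age = int(age)
--     for a, b, c in RECOMMENDED.get(gender, []):
--         if a <= age <= b:
--             return c
--     return AVERAGE
-- ===== SOURCE B (Python) =====
-- AVERAGE = 2300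
--
-- def recommended_cal(gender, age):
--     # direct indexing: bracket index computed arithmetically from booleans,
--     # then one tuple lookup -- no scan over (lo, hi) ranges
--     if not gender or not age:
--         return AVERAGE
--     age = int(age)
--     vals = {"male": (2650, 2700, 2500), "female": (2000, 2050, 1950)}.get(gender)
--     if vals is None or not (18 <= age <= 150):
--         return AVERAGE
--     return vals[(age >= 30) + (age >= 50)]
-- ===== Notes on version B (the rewrite author's own statement) =====
-- stated objective: alternative
-- what changed: Replaced the loop scanning (lo,hi,cal) ranges by a single in-range test plus arithmetic computation of the bracket index ((age>=30)+(age>=50)) used to directly index a flat 3-tuple per gender.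
import Mathlib
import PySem

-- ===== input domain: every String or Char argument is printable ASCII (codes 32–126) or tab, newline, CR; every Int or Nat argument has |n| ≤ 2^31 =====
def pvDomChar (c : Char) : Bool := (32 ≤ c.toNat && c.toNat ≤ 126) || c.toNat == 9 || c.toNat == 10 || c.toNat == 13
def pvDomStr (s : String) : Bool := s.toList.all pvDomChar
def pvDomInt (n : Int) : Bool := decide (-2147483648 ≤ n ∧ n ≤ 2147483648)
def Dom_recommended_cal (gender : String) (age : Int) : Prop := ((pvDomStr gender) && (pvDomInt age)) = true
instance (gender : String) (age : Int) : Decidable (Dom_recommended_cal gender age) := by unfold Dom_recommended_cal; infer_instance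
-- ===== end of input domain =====

-- B replaces A's loop over (lo,hi,cal) ranges by a single in-range test and a
-- bracket index computed arithmetically ((age>=30)+(age>=50)) indexing a flat
-- per-gender 3-tuple (alternative; same cost).

-- ===== PORT A =====
-- module-level constant RECOMMENDED (dict of gender → list of (lo, hi, cal))
def RECOMMENDED : PySem.Dict String (List (Int × Int × Int)) :=
  PySem.Dict.ofList
    [("male",   [(18, 29, 2650), (30, 49, 2700), (50, 150, 2500)]),
     ("female", [(18, 29, 2000), (30, 49, 2050), (50, 150, 1950)])]

def AVERAGE : Int := 2300

-- the `for a, b, c in …: if a <= age <= b: return c` loop, first match returns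
def recLoopA (rows : List (Int × Int × Int)) (age : Int) : Int :=
  match rows with
  | [] => AVERAGE
  | (a, b, c) :: rest => if a ≤ age ∧ age ≤ b then c else recLoopA rest age

def recommended_cal (gender : String) (age : Int) : Int :=
  if gender = "" ∨ age = 0 then AVERAGE
  else recLoopA (PySem.Dict.getD RECOMMENDED gender []) age

-- ===== PORT B =====
-- `(age >= 30) + (age >= 50)` : Python bools add as 0/1
def bIdx (age : Int) : Nat := (if age ≥ 30 then 1 else 0) + (if age ≥ 50 then 1 else 0)

def recommended_cal_alt (gender : String) (age : Int) : Int :=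
  if gender = "" ∨ age = 0 then 2300
  else
    let vals? : Option (Int × Int × Int) :=
      PySem.Dict.get? (PySem.Dict.ofList
        [("male", ((2650 : Int), (2700 : Int), (2500 : Int))),
         ("female", ((2000 : Int), (2050 : Int), (1950 : Int)))]) gender
    match vals? with
    | none => 2300
    | some (v0, v1, v2) =>
      if ¬(18 ≤ age ∧ age ≤ 150) then 2300
      else match bIdx age with
        | 0 => v0
        | 1 => v1
        | _ => v2

-- ===== PRECONDITION & SPEC =====
def Spec_recommended_cal (gender : String) (age : Int) (out : Int) : Prop := out = recommended_cal_alt gender age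
instance (gender : String) (age : Int) (out : Int) : Decidable (Spec_recommended_cal gender age out) := by unfold Spec_recommended_cal; infer_instance

-- ===== CLAIM (what is proved, stated in full; the proofs are below) =====
def Claim_equal_recommended_cal : Prop := ∀ (gender : String) (age : Int), Dom_recommended_cal gender age → Spec_recommended_cal gender age (recommended_cal gender age)

-- ===== LEMMAS AND PROOFS =====

-- ===== VERDICT (by name: the statement is the Claim_ definition above) =====
theorem recommended_cal_spec : Claim_equal_recommended_cal := by
  intro gender age _
  unfold Spec_recommended_cal recommended_cal recommended_cal_alt
  by_cases h0 : gender = "" ∨ age = 0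
  · simp [h0, AVERAGE]
  · simp only [h0, if_false]
    by_cases hm : gender = "male"
    · subst hm
      have : PySem.Dict.getD RECOMMENDED "male" [] =
          [(18, 29, 2650), (30, 49, 2700), (50, 150, 2500)] := by decide
      rw [this]
      simp only [show (PySem.Dict.get? (PySem.Dict.ofList
        [("male", ((2650 : Int), (2700 : Int), (2500 : Int))),
         ("female", ((2000 : Int), (2050 : Int), (1950 : Int)))]) "male")
        = some (2650, 2700, 2500) from by decide]
      simp only [recLoopA, AVERAGE]
      by_cases h30 : age ≥ 30 <;> by_cases h50 : age ≥ 50 <;>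
        simp only [bIdx, h30, h50, if_true, if_false, if_pos, if_neg, not_false_iff] <;>
        norm_num <;> split_ifs <;> omega
    · by_cases hf : gender = "female"
      · subst hf
        have : PySem.Dict.getD RECOMMENDED "female" [] =
            [(18, 29, 2000), (30, 49, 2050), (50, 150, 1950)] := by decide
        rw [this]
        simp only [show (PySem.Dict.get? (PySem.Dict.ofList
          [("male", ((2650 : Int), (2700 : Int), (2500 : Int))),
           ("female", ((2000 : Int), (2050 : Int), (1950 : Int)))]) "female")
          = some (2000, 2050, 1950) from by decide]
        simp only [recLoopA, AVERAGE]
        by_cases h30 : age ≥ 30 <;> by_cases h50 : age ≥ 50 <;>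
          simp only [bIdx, h30, h50, if_true, if_false, if_pos, if_neg, not_false_iff] <;>
          norm_num <;> split_ifs <;> omega
      · have hmk : RECOMMENDED = PySem.Dict.mk
            [("male",   [(18, 29, 2650), (30, 49, 2700), (50, 150, 2500)]),
             ("female", [(18, 29, 2000), (30, 49, 2050), (50, 150, 1950)])] := by decide
        have hmk2 : (PySem.Dict.ofList
            [("male", ((2650 : Int), (2700 : Int), (2500 : Int))),
             ("female", ((2000 : Int), (2050 : Int), (1950 : Int)))]) = PySem.Dict.mk
            [("male", ((2650 : Int), (2700 : Int), (2500 : Int))),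
             ("female", ((2000 : Int), (2050 : Int), (1950 : Int)))] := by decide
        have h1 : PySem.Dict.getD RECOMMENDED gender [] = [] := by
          simp [hmk, PySem.Dict.getD, PySem.Dict.get?_mk_cons, PySem.Dict.get?, Ne.symm hm, Ne.symm hf]
        have h2 : (PySem.Dict.get? (PySem.Dict.ofList
          [("male", ((2650 : Int), (2700 : Int), (2500 : Int))),
           ("female", ((2000 : Int), (2050 : Int), (1950 : Int)))]) gender)
          = none := by
          simp [hmk2, PySem.Dict.get?_mk_cons, PySem.Dict.get?, Ne.symm hm, Ne.symm hf]
        rw [h1, h2]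
        simp [recLoopA, AVERAGE]
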